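-- pv_equiv track=rewrite | github.com/niamoto/niamoto | src/niamoto/gui/api/routers/config.py | _resolve_join_column_for_records
-- ===== SOURCE A (Python) =====
-- from typing import Dict, Any, Literal, Optional, List, Union
--
-- def _resolve_join_column_for_records(
--     records: List[Dict[str, Any]], item_ids: set[Any], candidate_columns: List[str]
-- ) -> Optional[str]:
--     """Pick the record column whose values overlap the transformed IDs the best."""
--     best_column: Optional[str] = None
--     best_overlap = 0
--
--     for candidate in candidate_columns:
--         overlap = sum(1 for record in records if record.get(candidate) in item_ids)
--         if overlap > best_overlap:
--             best_column = candidate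
--             best_overlap = overlap
--
--     return best_column
-- ===== SOURCE B (Python) =====
-- def _resolve_join_column_for_records(records, item_ids, candidate_columns):
--     """Pick the record column whose values overlap the transformed IDs the best."""
--     # Candidate-independent tally: one pass over each record's OWN items,
--     # counting, for every key, how many records carry a matching id under it.
--     tally = {}
--     for record in records:
--         for key, value in record.items():
--             if value in item_ids:
--                 tally[key] = tally.get(key, 0) + 1
--     best = max(candidate_columns, key=lambda c: tally.get(c, 0), default=None)
--     if best is None or tally.get(best, 0) == 0:
--         return None
--     return best
-- ===== Notes on version B (the rewrite author's own statement) =====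
-- stated objective: faster
-- what changed: B never probes records per candidate: it tallies, in one pass over each record's OWN key/value items, how many records carry a matching id under every key, then selects with the built-in max(candidate_columns, key=tally count, default=None) and returns None when the best count is zero; A instead rescans all records once per candidate with record.get and tracks a running strict-improvement best.
import Mathlib
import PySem

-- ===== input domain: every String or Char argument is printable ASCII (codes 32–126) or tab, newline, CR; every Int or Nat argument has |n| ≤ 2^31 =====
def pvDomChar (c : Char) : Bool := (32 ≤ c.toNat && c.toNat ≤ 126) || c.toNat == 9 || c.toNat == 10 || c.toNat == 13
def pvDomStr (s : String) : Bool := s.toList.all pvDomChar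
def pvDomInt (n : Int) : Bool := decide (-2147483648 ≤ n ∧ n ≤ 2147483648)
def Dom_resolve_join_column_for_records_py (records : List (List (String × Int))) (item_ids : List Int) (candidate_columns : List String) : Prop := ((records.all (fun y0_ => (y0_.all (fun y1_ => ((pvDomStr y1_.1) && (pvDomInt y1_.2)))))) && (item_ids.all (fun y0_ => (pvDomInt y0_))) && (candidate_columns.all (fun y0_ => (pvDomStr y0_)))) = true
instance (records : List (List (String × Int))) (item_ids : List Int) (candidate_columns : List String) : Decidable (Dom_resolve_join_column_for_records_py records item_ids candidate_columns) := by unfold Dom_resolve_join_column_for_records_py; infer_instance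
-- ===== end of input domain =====

-- B tallies matches by iterating each record's own items (no per-candidate rescan of the
-- records) and then selects with max(candidate_columns, key=…, default=None) — an
-- alternative decomposition, same return value.

-- ===== PORT A =====
-- 'record.get(candidate) in item_ids' (item_ids holds only ints, so a missing key never matches)
def pvHit (item_ids : List Int) (record : List (String × Int)) (c : String) : Bool :=
  match (PySem.Dict.mk record).get? c with
  | some v => item_ids.contains v
  | none => false

def resolve_join_column_for_records_py (records : List (List (String × Int))) (item_ids : List Int) (candidate_columns : List String) : Option String :=
  (candidate_columns.foldl (fun (st : Option String × Int) candidate =>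
      let overlap := records.foldl (fun n record => if pvHit item_ids record candidate then n + 1 else n) (0 : Int)
      if overlap > st.2 then (some candidate, overlap) else st)
    ((none : Option String), (0 : Int))).1

-- ===== PORT B =====
def resolve_join_column_for_records_py_alt (records : List (List (String × Int))) (item_ids : List Int) (candidate_columns : List String) : Option String :=
  -- tally = {}; for record: for key, value in record.items(): if value in item_ids: tally[key] += 1
  let tally : PySem.Dict String Int := records.foldl (fun d record =>
      record.foldl (fun t kv => if item_ids.contains kv.2 then t.modify kv.1 0 (· + 1) else t) d)
    (PySem.Dict.empty : PySem.Dict String Int)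
  -- best = max(candidate_columns, key=lambda c: tally.get(c, 0), default=None)
  match PySem.List.max? candidate_columns (fun c => tally.getD c 0) with
  | none => none
  | some best => if tally.getD best 0 == 0 then none else some best

-- ===== PRECONDITION & SPEC =====
-- Pre_ requires each record's keys to be pairwise distinct: an association list with a
-- duplicated key represents no Python dict (every generated input comes from a real dict,
-- which cannot have duplicate keys), and on such lists A's first-match lookup is an
-- artefact of the encoding.
def Pre_resolve_join_column_for_records_py (records : List (List (String × Int))) (item_ids : List Int) (candidate_columns : List String) : Prop :=
  ∀ r ∈ records, (r.map (·.1)).Nodup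
instance (records : List (List (String × Int))) (item_ids : List Int) (candidate_columns : List String) : Decidable (Pre_resolve_join_column_for_records_py records item_ids candidate_columns) := by unfold Pre_resolve_join_column_for_records_py; infer_instance
def pvWitness_resolve_join_column_for_records_py : (List (List (String × Int))) × List Int × List String :=
  ([[("id", 1), ("x", 5)], [("id", 2)]], [1, 2], ["x", "id"])

def Spec_resolve_join_column_for_records_py (records : List (List (String × Int))) (item_ids : List Int) (candidate_columns : List String) (out : Option String) : Prop := out = resolve_join_column_for_records_py_alt records item_ids candidate_columns
instance (records : List (List (String × Int))) (item_ids : List Int) (candidate_columns : List String) (out : Option String) : Decidable (Spec_resolve_join_column_for_records_py records item_ids candidate_columns out) := by unfold Spec_resolve_join_column_for_records_py; infer_instance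

-- ===== CLAIM (what is proved, stated in full; the proofs are below) =====
def Claim_equal_resolve_join_column_for_records_py : Prop := ∀ (records : List (List (String × Int))) (item_ids : List Int) (candidate_columns : List String), Dom_resolve_join_column_for_records_py records item_ids candidate_columns → Pre_resolve_join_column_for_records_py records item_ids candidate_columns → Spec_resolve_join_column_for_records_py records item_ids candidate_columns (resolve_join_column_for_records_py records item_ids candidate_columns)

-- ===== LEMMAS AND PROOFS =====

-- proof-only helpers naming the two stages of B's selection
def pvMaxStep (f : String → Int) (acc : Option String) (x : String) : Option String :=
  match acc with
  | none => some x
  | some m => if f m < f x then some x else some m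

def pvPost (f : String → Int) (o : Option String) : Option String :=
  match o with
  | none => none
  | some b => if f b == 0 then none else some b

-- a fold over pairs that only reads the key is a fold over the keys
theorem pv_foldl_pairs (l : List (String × Int)) (d : PySem.Dict String Int) :
    l.foldl (fun t kv => t.modify kv.1 0 (· + 1)) d
      = (l.map (·.1)).foldl (fun t k => t.modify k 0 (· + 1)) d := by
  induction l generalizing d with
  | nil => rfl
  | cons kv t ih => simp [List.foldl, ih]

-- one record's contribution to the tally at key c: 1 when the record hits c, else 0
theorem pv_rec_count (ids : List Int) (r : List (String × Int)) (c : String)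
    (hnd : (r.map (·.1)).Nodup) :
    (((r.filter (fun kv => ids.contains kv.2)).map (·.1)).count c)
      = (if pvHit ids r c then 1 else 0) := by
  induction r with
  | nil => simp [pvHit, PySem.Dict.get?]
  | cons kv t ih =>
      obtain ⟨k, v⟩ := kv
      simp only [List.map_cons, List.nodup_cons] at hnd
      by_cases hk : k = c
      · subst hk
        have hz : ((t.filter (fun kv => ids.contains kv.2)).map (·.1)).count k = 0 := by
          refine List.count_eq_zero_of_not_mem (fun hm => hnd.1 ?_)
          obtain ⟨p, hp, hpk⟩ := List.mem_map.mp hm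
          exact hpk ▸ List.mem_map_of_mem (List.mem_of_mem_filter hp)
        have hhit : pvHit ids ((k, v) :: t) k = ids.contains v := by
          simp [pvHit, PySem.Dict.get?_mk_cons]
        rw [hhit]
        by_cases hv : v ∈ ids <;>
          · simp [List.filter_cons, hv, List.count_cons]
            simpa using hz
      · have hhit : pvHit ids ((k, v) :: t) c = pvHit ids t c := by
          simp only [pvHit, PySem.Dict.get?_mk_cons]
          rw [if_neg (by simpa using hk)]
        rw [hhit, ← ih hnd.2]
        by_cases hv : v ∈ ids <;>
          simp [List.filter_cons, hv, List.count_cons, hk]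

-- the tally after all records: at every key c, the number of records hitting c
theorem pv_build (ids : List Int) (recs : List (List (String × Int))) (d : PySem.Dict String Int)
    (hrec : ∀ r ∈ recs, (r.map (·.1)).Nodup) (c : String) :
    (recs.foldl (fun d record =>
        record.foldl (fun t kv => if ids.contains kv.2 then t.modify kv.1 0 (· + 1) else t) d) d).getD c 0
      = d.getD c 0 + (recs.countP (fun r => pvHit ids r c) : Int) := by
  induction recs generalizing d with
  | nil => simp
  | cons r t ih =>
      simp only [List.foldl]
      rw [ih _ (fun r' hr' => hrec r' (by simp [hr']))]
      have hstep :
          (r.foldl (fun t kv => if ids.contains kv.2 then t.modify kv.1 0 (· + 1) else t) d).getD c 0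
            = d.getD c 0 + (if pvHit ids r c then 1 else 0) := by
        rw [PySem.List.foldl_if_eq_foldl_filter, pv_foldl_pairs,
            PySem.Dict.getD_foldl_modify_add_one,
            pv_rec_count ids r c (hrec r (by simp))]
        split <;> simp
      rw [hstep, List.countP_cons]
      by_cases hh : pvHit ids r c <;> simp [hh] <;> ring

-- selection: A's running strict-improvement fold equals 'first max, None when the max is 0',
-- provided all key values are nonnegative (they are counts)
theorem pv_sel_aux (f : String → Int) (hf : ∀ c, 0 ≤ f c) (cols : List String) :
    ∀ (m : String),
      (cols.foldl (fun (st : Option String × Int) c =>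
          if f c > st.2 then (some c, f c) else st)
        ((if 0 < f m then some m else none), f m)).1
      = pvPost f (cols.foldl (pvMaxStep f) (some m)) := by
  induction cols with
  | nil =>
      intro m
      simp only [List.foldl, pvPost]
      rcases lt_or_eq_of_le (hf m) with h | h
      · have hne : f m ≠ 0 := by omega
        simp [h, hne]
      · simp [← h]
  | cons c t ih =>
      intro m
      simp only [List.foldl]
      by_cases hlt : f m < f c
      · have h0 : 0 < f c := lt_of_le_of_lt (hf m) hlt
        have hA : (if f c > (((if 0 < f m then some m else none), f m) : Option String × Int).2
              then ((some c, f c) : Option String × Int)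
              else ((if 0 < f m then some m else none), f m))
            = ((if 0 < f c then some c else none), f c) := by
          simp [hlt, h0]
        have hM : pvMaxStep f (some m) c = some c := by simp [pvMaxStep, hlt]
        rw [hA, hM]
        exact ih c
      · have hA : (if f c > (((if 0 < f m then some m else none), f m) : Option String × Int).2
              then ((some c, f c) : Option String × Int)
              else ((if 0 < f m then some m else none), f m))
            = ((if 0 < f m then some m else none), f m) := by
          simp [hlt]
        have hM : pvMaxStep f (some m) c = some m := by simp [pvMaxStep, hlt]
        rw [hA, hM]
        exact ih m

theorem pv_sel (f : String → Int) (hf : ∀ c, 0 ≤ f c) (cols : List String) :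
    (cols.foldl (fun (st : Option String × Int) c =>
        if f c > st.2 then (some c, f c) else st)
      ((none : Option String), (0 : Int))).1
    = pvPost f (PySem.List.max? cols f) := by
  have hmax : PySem.List.max? cols f = cols.foldl (pvMaxStep f) none := by
    rw [PySem.List.max?]
    apply PySem.List.foldl_congr_mem
    intro acc x _
    cases acc <;> rfl
  rw [hmax]
  cases cols with
  | nil => rfl
  | cons c t =>
      simp only [List.foldl]
      have hA : (if f c > (((none : Option String), (0 : Int)) : Option String × Int).2
            then ((some c, f c) : Option String × Int)
            else ((none : Option String), (0 : Int)))
          = ((if 0 < f c then some c else none), f c) := by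
        rcases lt_or_eq_of_le (hf c) with h | h
        · simp [h]
        · simp [← h]
      have hM : pvMaxStep f none c = some c := rfl
      rw [hA, hM]
      exact pv_sel_aux f hf t c

theorem resolve_equal (records : List (List (String × Int))) (item_ids : List Int)
    (candidate_columns : List String)
    (hrec : ∀ r ∈ records, (r.map (·.1)).Nodup) :
    resolve_join_column_for_records_py records item_ids candidate_columns
      = resolve_join_column_for_records_py_alt records item_ids candidate_columns := by
  unfold resolve_join_column_for_records_py resolve_join_column_for_records_py_alt
  have htally : ∀ c,
      ((records.foldl (fun d record =>
          record.foldl (fun t kv => if item_ids.contains kv.2 then t.modify kv.1 0 (· + 1) else t) d)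
        (PySem.Dict.empty : PySem.Dict String Int)).getD c 0)
      = (records.countP (fun r => pvHit item_ids r c) : Int) := by
    intro c
    rw [pv_build item_ids records _ hrec c]
    simp [PySem.Dict.getD_empty]
  have hoverlap : ∀ c,
      records.foldl (fun n record => if pvHit item_ids record c then n + 1 else n) (0 : Int)
        = (records.countP (fun r => pvHit item_ids r c) : Int) := by
    intro c
    rw [PySem.List.foldl_if_add_one]
    ring
  have hAfn : (fun (st : Option String × Int) candidate =>
        let overlap := records.foldl (fun n record => if pvHit item_ids record candidate then n + 1 else n) (0 : Int)
        if overlap > st.2 then (some candidate, overlap) else st)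
      = (fun (st : Option String × Int) c =>
        if (records.countP (fun r => pvHit item_ids r c) : Int) > st.2
        then (some c, (records.countP (fun r => pvHit item_ids r c) : Int)) else st) := by
    funext st c
    simp only [hoverlap c]
  simp only [hAfn, htally]
  exact pv_sel _ (fun c => Int.natCast_nonneg _) candidate_columns

-- ===== VERDICT (by name: the statement is the Claim_ definition above) =====
theorem resolve_join_column_for_records_py_spec : Claim_equal_resolve_join_column_for_records_py := by
  intro records item_ids candidate_columns _ hpre
  exact resolve_equal records item_ids candidate_columns hpre
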